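-- pv_equiv track=rewrite | github.com/mtclinton/pyelliptic | p224.py | get_28_bits_from_end
-- ===== SOURCE A (Python) =====
-- bottom28Bits = 0xFFFFFFF
--
-- def get_28_bits_from_end(buf, shift):
--     ret = 0
--     for i in range(4):
--         b = 0
--         l = len(buf)
--         if l > 0:
--             b = buf[l - 1]
--             if i != 3 or shift == 4:
--                 buf = buf[: l - 1]
--         ret |= b << (8 * i) >> shift
--     ret &= bottom28Bits
--     return ret, buf
-- ===== SOURCE B (Python) =====
-- bottom28Bits = 0xFFFFFFF
--
-- def get_28_bits_from_end(buf, shift):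
--     n = len(buf)
--     ret = 0
--     for i, b in enumerate(reversed(buf[-4:])):
--         ret |= b << (8 * i) >> shift
--     ret &= bottom28Bits
--     removed = min(n, 3) + (1 if n >= 4 and shift == 4 else 0)
--     return ret, buf[: n - removed]
-- ===== Notes on version B (the rewrite author's own statement) =====
-- stated objective: simpler
-- what changed: B replaces A's 4-iteration loop that repeatedly re-measures, last-indexes and re-slices the buffer with a single pass over the (at most 4) tail elements plus a closed-form count of how many trailing bytes are consumed, so the buffer is truncated once.
import Mathlib
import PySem

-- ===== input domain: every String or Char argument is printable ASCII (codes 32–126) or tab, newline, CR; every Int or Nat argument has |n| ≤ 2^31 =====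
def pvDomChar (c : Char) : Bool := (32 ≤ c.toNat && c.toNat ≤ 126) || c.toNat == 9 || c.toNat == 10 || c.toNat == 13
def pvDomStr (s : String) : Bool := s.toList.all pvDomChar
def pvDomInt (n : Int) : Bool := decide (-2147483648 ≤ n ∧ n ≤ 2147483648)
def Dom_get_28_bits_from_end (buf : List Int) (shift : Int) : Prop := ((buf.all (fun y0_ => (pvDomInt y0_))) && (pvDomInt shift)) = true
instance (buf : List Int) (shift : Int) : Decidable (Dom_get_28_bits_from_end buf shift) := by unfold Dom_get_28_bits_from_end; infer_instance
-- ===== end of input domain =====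

-- B replaces A's truncate-as-you-go loop (which re-measures, last-indexes and re-slices the
-- buffer on every iteration) by one pass over the ≤ 4 tail elements plus a closed-form count
-- of the consumed bytes, truncating the buffer once (objective: simpler; same return value).

-- ===== PORT A =====
def bottom28Bits : Int := 0xFFFFFFF

-- one iteration of A's 'for i in range(4)' body, on state (ret, buf)
def pvAStep (shift : Int) (st : Int × List Int) (i : Nat) : Int × List Int :=
  let ret := st.1
  let buf := st.2
  let b : Int := 0
  let l := buf.length
  let (b, buf) :=
    if 0 < l then
      let b := (PySem.List.pyGet? buf ((l : Int) - 1)).getD b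
      let buf := if i ≠ 3 ∨ shift = 4 then PySem.List.slice buf none (some ((l : Int) - 1)) else buf
      (b, buf)
    else (b, buf)
  (PySem.Int.bor ret (b <<< (8 * i) >>> shift.toNat), buf)

def get_28_bits_from_end (buf : List Int) (shift : Int) : Int × List Int :=
  let st := (List.range 4).foldl (pvAStep shift) (0, buf)
  (PySem.Int.band st.1 bottom28Bits, st.2)

-- ===== PORT B =====
def get_28_bits_from_end_alt (buf : List Int) (shift : Int) : Int × List Int :=
  let n := buf.length
  let tail := (PySem.List.slice buf (some (-4)) none).reverse
  let ret := (PySem.List.enumerate tail).foldl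
    (fun ret (p : Int × Int) => PySem.Int.bor ret (p.2 <<< (8 * p.1).toNat >>> shift.toNat)) 0
  let ret := PySem.Int.band ret bottom28Bits
  let removed : Nat := min n 3 + (if n ≥ 4 ∧ shift = 4 then 1 else 0)
  (ret, PySem.List.slice buf none (some ((n : Int) - (removed : Int))))

-- ===== PRECONDITION & SPEC =====
-- Python raises ValueError ('negative shift count') whenever shift < 0, so exactly those inputs are excluded.
def Pre_get_28_bits_from_end (buf : List Int) (shift : Int) : Prop := 0 ≤ shift
instance (buf : List Int) (shift : Int) : Decidable (Pre_get_28_bits_from_end buf shift) := by unfold Pre_get_28_bits_from_end; infer_instance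
def pvWitness_get_28_bits_from_end : List Int × Int := ([1, 2, 3, 4, 5], 4)

def Spec_get_28_bits_from_end (buf : List Int) (shift : Int) (out : Int × List Int) : Prop := out = get_28_bits_from_end_alt buf shift
instance (buf : List Int) (shift : Int) (out : Int × List Int) : Decidable (Spec_get_28_bits_from_end buf shift out) := by unfold Spec_get_28_bits_from_end; infer_instance

-- ===== CLAIM (what is proved, stated in full; the proofs are below) =====
def Claim_equal_get_28_bits_from_end : Prop := ∀ (buf : List Int) (shift : Int), Dom_get_28_bits_from_end buf shift → Pre_get_28_bits_from_end buf shift → Spec_get_28_bits_from_end buf shift (get_28_bits_from_end buf shift)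

-- ===== LEMMAS AND PROOFS =====

theorem pvAStep_nil (shift ret : Int) (i : Nat) :
    pvAStep shift (ret, ([] : List Int)) i = (ret, []) := by
  simp [pvAStep, Int.zero_shiftLeft, Int.zero_shiftRight, PySem.Int.bor_zero]

theorem pvAStep_concat (shift ret : Int) (i : Nat) (ys : List Int) (x : Int) :
    pvAStep shift (ret, ys ++ [x]) i =
      (PySem.Int.bor ret (x <<< (8 * i) >>> shift.toNat),
       if i ≠ 3 ∨ shift = 4 then ys else ys ++ [x]) := by
  have h1 : (((ys ++ [x]).length : Nat) : Int) - 1 = ((ys.length : Nat) : Int) := by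
    simp
  simp only [pvAStep, h1, PySem.List.pyGet?_natCast, List.getElem?_concat_length,
    PySem.List.slice_to_natCast, List.take_left]
  simp

theorem pvAStep_single (shift ret : Int) (i : Nat) (x : Int) :
    pvAStep shift (ret, [x]) i =
      (PySem.Int.bor ret (x <<< (8 * i) >>> shift.toNat),
       if i ≠ 3 ∨ shift = 4 then [] else [x]) := by
  simpa using pvAStep_concat shift ret i [] x

theorem pvAStep_pair (shift ret : Int) (i : Nat) (y x : Int) :
    pvAStep shift (ret, [y, x]) i =
      (PySem.Int.bor ret (x <<< (8 * i) >>> shift.toNat),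
       if i ≠ 3 ∨ shift = 4 then [y] else [y, x]) := by
  simpa using pvAStep_concat shift ret i [y] x

theorem pvAStep_triple (shift ret : Int) (i : Nat) (z y x : Int) :
    pvAStep shift (ret, [z, y, x]) i =
      (PySem.Int.bor ret (x <<< (8 * i) >>> shift.toNat),
       if i ≠ 3 ∨ shift = 4 then [z, y] else [z, y, x]) := by
  simpa using pvAStep_concat shift ret i [z, y] x

theorem pvAStep_app2 (shift ret : Int) (i : Nat) (ys : List Int) (y x : Int) :
    pvAStep shift (ret, ys ++ [y, x]) i =
      (PySem.Int.bor ret (x <<< (8 * i) >>> shift.toNat),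
       if i ≠ 3 ∨ shift = 4 then ys ++ [y] else ys ++ [y, x]) := by
  simpa [List.append_assoc] using pvAStep_concat shift ret i (ys ++ [y]) x

theorem pvAStep_app3 (shift ret : Int) (i : Nat) (ys : List Int) (z y x : Int) :
    pvAStep shift (ret, ys ++ [z, y, x]) i =
      (PySem.Int.bor ret (x <<< (8 * i) >>> shift.toNat),
       if i ≠ 3 ∨ shift = 4 then ys ++ [z, y] else ys ++ [z, y, x]) := by
  simpa [List.append_assoc] using pvAStep_concat shift ret i (ys ++ [z, y]) x

theorem pvAStep_app4 (shift ret : Int) (i : Nat) (ys : List Int) (w z y x : Int) :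
    pvAStep shift (ret, ys ++ [w, z, y, x]) i =
      (PySem.Int.bor ret (x <<< (8 * i) >>> shift.toNat),
       if i ≠ 3 ∨ shift = 4 then ys ++ [w, z, y] else ys ++ [w, z, y, x]) := by
  simpa [List.append_assoc] using pvAStep_concat shift ret i (ys ++ [w, z, y]) x

theorem pv_eq (buf : List Int) (shift : Int) :
    get_28_bits_from_end buf shift = get_28_bits_from_end_alt buf shift := by
  have hr4 : List.range 4 = [0, 1, 2, 3] := rfl
  have hrr := (List.reverse_reverse buf).symm
  rcases hb : buf.reverse with _ | ⟨a, _ | ⟨b, _ | ⟨c, _ | ⟨d, t⟩⟩⟩⟩ <;>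
    rw [hb] at hrr <;>
    simp only [List.reverse_cons, List.reverse_nil, List.nil_append, List.append_assoc] at hrr <;>
    subst hrr
  · by_cases hs : shift = 4 <;>
      simp [get_28_bits_from_end, get_28_bits_from_end_alt, hr4, hs, pvAStep_nil,
        PySem.List.slice, PySem.List.clampIdx]
  · by_cases hs : shift = 4 <;>
      simp [get_28_bits_from_end, get_28_bits_from_end_alt, hr4, hs, pvAStep_nil, pvAStep_single,
        PySem.List.slice, PySem.List.clampIdx]
  · by_cases hs : shift = 4 <;>
      simp [get_28_bits_from_end, get_28_bits_from_end_alt, hr4, hs, pvAStep_nil, pvAStep_single,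
        pvAStep_pair, PySem.List.slice, PySem.List.clampIdx]
  · by_cases hs : shift = 4 <;>
      simp [get_28_bits_from_end, get_28_bits_from_end_alt, hr4, hs, pvAStep_nil, pvAStep_single,
        pvAStep_pair, pvAStep_triple, PySem.List.slice, PySem.List.clampIdx]
  · have h0 : ¬ ((t.length : Int) < 0) := by omega
    have h1 : ¬ ((t.length : Int) + 4 < 3) := by omega
    have h2 : ((t.length : Int) + 4 - 3).toNat = t.length + 1 := by omega
    have h5 : t.length + 4 - t.length = 4 := by omega
    have h4 : List.take (t.length + 1) (t.reverse ++ [d, c, b, a]) = t.reverse ++ [d] := by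
      have h6 : t.length + 1 = t.reverse.length + 1 := by simp
      rw [h6, List.take_append]
      simp
    by_cases hs : shift = 4 <;>
      simp [get_28_bits_from_end, get_28_bits_from_end_alt, hr4, hs, pvAStep_app2, pvAStep_app3,
        pvAStep_app4, pvAStep_concat, PySem.List.slice, PySem.List.clampIdx,
        h0, h1, h2, h4, h5, PySem.List.enumerate]

-- ===== VERDICT (by name: the statement is the Claim_ definition above) =====
theorem get_28_bits_from_end_spec : Claim_equal_get_28_bits_from_end := by
  intro buf shift _ _
  exact pv_eq buf shift
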